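-- pv_equiv track=rewrite | github.com/cuixinyuan666/a_chan_a | a_replay_parts/a_data_extra.py | balanced_group_boundaries
-- ===== SOURCE A (Python) =====
-- def balanced_group_boundaries(total: int, parts: int) -> list[tuple[int, int]]:
--     total = max(0, int(total))
--     parts = max(1, int(parts))
--     if total <= 0:
--         return []
--     parts = min(parts, total)
--     q, r = divmod(total, parts)
--     boundaries: list[tuple[int, int]] = []
--     start = 0
--     for idx in range(parts):
--         size = q + (1 if idx < r else 0)
--         end = start + size
--         if end > start:
--             boundaries.append((start, end))
--         start = end
--     return boundaries
-- ===== SOURCE B (Python) =====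
-- def balanced_group_boundaries(total: int, parts: int) -> list[tuple[int, int]]:
--     total = max(0, int(total))
--     parts = max(1, int(parts))
--     if total <= 0:
--         return []
--     parts = min(parts, total)
--     q, r = divmod(total, parts)
--     return [
--         (idx * q + min(idx, r), (idx + 1) * q + min(idx + 1, r))
--         for idx in range(parts)
--     ]
-- ===== Notes on version B (the rewrite author's own statement) =====
-- stated objective: alternative
-- what changed: Replaces the running start/end accumulator loop (with its conditional append) by a single list comprehension computing each boundary independently via the closed form idx*q + min(idx, r).
import Mathlib
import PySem

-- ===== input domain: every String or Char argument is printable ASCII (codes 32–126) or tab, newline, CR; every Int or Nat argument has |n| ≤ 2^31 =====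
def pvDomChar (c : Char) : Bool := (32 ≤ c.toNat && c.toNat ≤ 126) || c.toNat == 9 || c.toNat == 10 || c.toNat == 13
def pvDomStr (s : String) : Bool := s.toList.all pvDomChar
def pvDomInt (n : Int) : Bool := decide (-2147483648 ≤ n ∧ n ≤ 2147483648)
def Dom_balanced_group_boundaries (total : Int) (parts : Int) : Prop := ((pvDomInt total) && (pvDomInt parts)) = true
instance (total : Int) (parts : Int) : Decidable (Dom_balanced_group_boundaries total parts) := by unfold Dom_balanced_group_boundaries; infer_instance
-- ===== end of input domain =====

-- B replaces A's running start/end accumulator loop by a list comprehension computing each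
-- boundary independently from the closed form idx*q + min(idx, r) (objective: alternative).

-- ===== PORT A =====
def balanced_group_boundaries (total : Int) (parts : Int) : List (Int × Int) :=
  let total := max 0 total
  let parts := max 1 parts
  if total ≤ 0 then []
  else
    let parts := min parts total
    let q := PySem.Int.floordiv total parts
    let r := PySem.Int.mod total parts
    let st := (PySem.List.pyRange 0 parts 1).foldl
      (fun (st : List (Int × Int) × Int) idx =>
        let size := q + (if idx < r then 1 else 0)
        let e := st.2 + size
        (if st.2 < e then st.1 ++ [(st.2, e)] else st.1, e))
      ([], 0)
    st.1

-- ===== PORT B =====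
def balanced_group_boundaries_alt (total : Int) (parts : Int) : List (Int × Int) :=
  let total := max 0 total
  let parts := max 1 parts
  if total ≤ 0 then []
  else
    let parts := min parts total
    let q := PySem.Int.floordiv total parts
    let r := PySem.Int.mod total parts
    (PySem.List.pyRange 0 parts 1).map
      (fun idx => (idx * q + min idx r, (idx + 1) * q + min (idx + 1) r))

-- ===== PRECONDITION & SPEC =====
def Spec_balanced_group_boundaries (total : Int) (parts : Int) (out : List (Int × Int)) : Prop := out = balanced_group_boundaries_alt total parts
instance (total : Int) (parts : Int) (out : List (Int × Int)) : Decidable (Spec_balanced_group_boundaries total parts out) := by unfold Spec_balanced_group_boundaries; infer_instance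

-- ===== CLAIM (what is proved, stated in full; the proofs are below) =====
def Claim_equal_balanced_group_boundaries : Prop := ∀ (total : Int) (parts : Int), Dom_balanced_group_boundaries total parts → Spec_balanced_group_boundaries total parts (balanced_group_boundaries total parts)

-- ===== LEMMAS AND PROOFS =====

-- Loop invariant: after n iterations A's fold holds B's first n pairs and start = n*q + min n r.
theorem bgb_fold_eq (q r : Int) (hq : 1 ≤ q) (hr : 0 ≤ r) : ∀ (n : Nat),
    (PySem.List.pyRange 0 (n : Int) 1).foldl
      (fun (st : List (Int × Int) × Int) idx =>
        let size := q + (if idx < r then 1 else 0)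
        let e := st.2 + size
        (if st.2 < e then st.1 ++ [(st.2, e)] else st.1, e))
      ([], 0)
    = ((PySem.List.pyRange 0 (n : Int) 1).map
        (fun idx => (idx * q + min idx r, (idx + 1) * q + min (idx + 1) r)),
       (n : Int) * q + min (n : Int) r) := by
  intro n
  induction n with
  | zero => simp [PySem.List.pyRange_one_eq_nil (by norm_num : (0:Int) ≤ 0), min_eq_left hr]
  | succ n ih =>
    have hcast : ((n + 1 : Nat) : Int) = (n : Int) + 1 := by push_cast; ring
    rw [hcast, PySem.List.pyRange_one_succ_right (by positivity), List.foldl_append,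
      List.map_append, ih]
    simp only [List.foldl_cons, List.foldl_nil, List.map_cons, List.map_nil]
    have hgrow : (n : Int) * q + min (n : Int) r <
        (n : Int) * q + min (n : Int) r + (q + if (n : Int) < r then 1 else 0) := by
      split_ifs <;> omega
    have hEnd : (n : Int) * q + min (n : Int) r + (q + if (n : Int) < r then 1 else 0)
        = ((n : Int) + 1) * q + min ((n : Int) + 1) r := by
      split_ifs with h <;> (rw [Int.add_mul, one_mul]; omega)
    rw [if_pos hgrow, hEnd]

-- ===== VERDICT (by name: the statement is the Claim_ definition above) =====
theorem balanced_group_boundaries_spec : Claim_equal_balanced_group_boundaries := by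
  intro total parts _
  unfold Spec_balanced_group_boundaries balanced_group_boundaries balanced_group_boundaries_alt
  simp only
  set t := max 0 total with ht
  set p0 := max 1 parts with hp0
  by_cases h : t ≤ 0
  · simp [h]
  · rw [if_neg h]
    rw [not_le] at h
    set p := min p0 t with hp
    have hp1 : 1 ≤ p := by simp [hp, hp0]; omega
    have hpt : p ≤ t := min_le_right _ _
    have hppos : 0 < p := by omega
    set q := PySem.Int.floordiv t p with hq
    set r := PySem.Int.mod t p with hr
    have hq1 : 1 ≤ q := by
      rw [hq, PySem.Int.le_floordiv_iff_mul_le hppos]; omega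
    have hr0 : 0 ≤ r := by
      rw [hr, PySem.Int.mod_eq_emod_of_pos hppos]
      exact Int.emod_nonneg _ (by omega)
    have hn : p = ((p.toNat : Nat) : Int) := by omega
    rw [hn]
    rw [if_neg (not_le.mpr h), bgb_fold_eq q r hq1 hr0 p.toNat]
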